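-- pv_equiv track=rewrite | github.com/Prince-Sharma-07/Disha-AI-Health-Coach | backend/app/protocols.py | match_protocols
-- ===== SOURCE A (Python) =====
-- def match_protocols(user_input: str) -> str | None:
--     """
--     Rule-based medical protocols.
--     These override LLM responses for safety-critical or common cases.
--     """
--
--     text = user_input.lower()
--
--     # ======================
--     # FEVER
--     # ======================
--     if any(word in text for word in ["fever", "high temperature", "temperature"]):
--         return (
--             "It sounds like you may have a fever. Please stay hydrated, get adequate rest, "
--             "and monitor your temperature regularly. If the fever lasts more than 2 days, "
--             "goes above 102°F (39°C), or is accompanied by severe symptoms like breathing "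
--             "difficulty or confusion, please consult a doctor."
--         )
--
--     # ======================
--     # COMMON COLD
--     # ======================
--     if any(word in text for word in ["cold", "runny nose", "sneezing", "nasal congestion"]):
--         return (
--             "For common cold symptoms, make sure to rest well, drink warm fluids, "
--             "and stay hydrated. Steam inhalation and warm saltwater gargles may help. "
--             "Most colds resolve on their own within a few days. If symptoms worsen or "
--             "persist beyond a week, consider consulting a doctor."
--         )
--
--     # ======================
--     # COUGH
--     # ======================
--     if "cough" in text:
--         return (
--             "A mild cough can often be managed with warm fluids, honey (if suitable), "
--             "and adequate rest. Avoid cold drinks and smoking. If the cough lasts more "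
--             "than 2 weeks, produces blood, or is associated with chest pain or shortness "
--             "of breath, please seek medical advice."
--         )
--
--     # ======================
--     # SORE THROAT
--     # ======================
--     if any(word in text for word in ["sore throat", "throat pain", "throat infection",]):
--         return (
--             "For a sore throat, try warm saltwater gargles, stay hydrated, and rest your voice. "
--             "Warm fluids may provide relief. If you experience high fever, difficulty swallowing, "
--             "or symptoms lasting more than a few days, consult a healthcare professional."
--         )
--
--     # ======================
--     # HEADACHE
--     # ======================
--     if "headache" in text or "head pain" in text:
--         return (
--             "Headaches are often caused by stress, dehydration, or lack of sleep. "
--             "Try resting in a quiet, dark room and drink enough water. "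
--             "If headaches are severe, persistent, or accompanied by vision problems, "
--             "vomiting, or fever, please consult a doctor."
--         )
--
--     # ======================
--     # STOMACH PAIN / DIGESTIVE ISSUES
--     # ======================
--     if any(word in text for word in ["stomach pain", "abdominal pain", "diarrhea", "loose motion"]):
--         return (
--             "For stomach discomfort or diarrhea, drink plenty of fluids and consider oral "
--             "rehydration solutions (ORS). Eat light foods and avoid spicy or oily meals. "
--             "If symptoms persist, worsen, or you notice blood in stools, seek medical care."
--         )
--
--     # ======================
--     # VOMITING / NAUSEA
--     # ======================
--     if any(word in text for word in ["vomiting", "nausea", "throwing up"]):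
--         return (
--             "If you are experiencing nausea or vomiting, try taking small sips of water or ORS "
--             "and rest. Avoid heavy meals until symptoms improve. If vomiting is persistent, "
--             "severe, or accompanied by dehydration or abdominal pain, consult a doctor."
--         )
--
--     # ======================
--     # BODY ACHE / FATIGUE
--     # ======================
--     if any(word in text for word in ["body ache", "fatigue", "tired", "weakness"]):
--         return (
--             "Body aches and fatigue can occur due to viral infections, stress, or lack of rest. "
--             "Ensure proper sleep, hydration, and light meals. If fatigue is severe, long-lasting, "
--             "or affecting daily activities, it’s best to consult a healthcare provider."
--         )
--
--     # ======================
--     # NO PROTOCOL MATCH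
--     # ======================
--     return None
-- ===== SOURCE B (Python) =====
-- # Flat keyword->priority table; B collects ALL matching keywords in one pass,
-- # then answers with the response of the minimum (highest-priority) matched rule.
-- KEYWORDS = [
--     ("fever", 0), ("high temperature", 0), ("temperature", 0),
--     ("cold", 1), ("runny nose", 1), ("sneezing", 1), ("nasal congestion", 1),
--     ("cough", 2),
--     ("sore throat", 3), ("throat pain", 3), ("throat infection", 3),
--     ("headache", 4), ("head pain", 4),
--     ("stomach pain", 5), ("abdominal pain", 5), ("diarrhea", 5), ("loose motion", 5),
--     ("vomiting", 6), ("nausea", 6), ("throwing up", 6),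
--     ("body ache", 7), ("fatigue", 7), ("tired", 7), ("weakness", 7),
-- ]
--
-- RESPONSES = [
--     "It sounds like you may have a fever. Please stay hydrated, get adequate rest, "
--     "and monitor your temperature regularly. If the fever lasts more than 2 days, "
--     "goes above 102\u00b0F (39\u00b0C), or is accompanied by severe symptoms like breathing "
--     "difficulty or confusion, please consult a doctor.",
--     "For common cold symptoms, make sure to rest well, drink warm fluids, "
--     "and stay hydrated. Steam inhalation and warm saltwater gargles may help. "
--     "Most colds resolve on their own within a few days. If symptoms worsen or "
--     "persist beyond a week, consider consulting a doctor.",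
--     "A mild cough can often be managed with warm fluids, honey (if suitable), "
--     "and adequate rest. Avoid cold drinks and smoking. If the cough lasts more "
--     "than 2 weeks, produces blood, or is associated with chest pain or shortness "
--     "of breath, please seek medical advice.",
--     "For a sore throat, try warm saltwater gargles, stay hydrated, and rest your voice. "
--     "Warm fluids may provide relief. If you experience high fever, difficulty swallowing, "
--     "or symptoms lasting more than a few days, consult a healthcare professional.",
--     "Headaches are often caused by stress, dehydration, or lack of sleep. "
--     "Try resting in a quiet, dark room and drink enough water. "
--     "If headaches are severe, persistent, or accompanied by vision problems, "
--     "vomiting, or fever, please consult a doctor.",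
--     "For stomach discomfort or diarrhea, drink plenty of fluids and consider oral "
--     "rehydration solutions (ORS). Eat light foods and avoid spicy or oily meals. "
--     "If symptoms persist, worsen, or you notice blood in stools, seek medical care.",
--     "If you are experiencing nausea or vomiting, try taking small sips of water or ORS "
--     "and rest. Avoid heavy meals until symptoms improve. If vomiting is persistent, "
--     "severe, or accompanied by dehydration or abdominal pain, consult a doctor.",
--     "Body aches and fatigue can occur due to viral infections, stress, or lack of rest. "
--     "Ensure proper sleep, hydration, and light meals. If fatigue is severe, long-lasting, "
--     "or affecting daily activities, it\u2019s best to consult a healthcare provider.",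
-- ]
--
--
-- def match_protocols(user_input: str) -> str | None:
--     text = user_input.lower()
--     matched = [prio for kw, prio in KEYWORDS if kw in text]
--     if not matched:
--         return None
--     return RESPONSES[min(matched)]
-- ===== Notes on version B (the rewrite author's own statement) =====
-- stated objective: alternative
-- what changed: A's early-return priority if-chain is replaced by two staged passes over a flat keyword-to-priority table: first collect the priorities of ALL keywords occurring in the text, then return the response of the minimum collected priority (None if none matched).
import Mathlib
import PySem

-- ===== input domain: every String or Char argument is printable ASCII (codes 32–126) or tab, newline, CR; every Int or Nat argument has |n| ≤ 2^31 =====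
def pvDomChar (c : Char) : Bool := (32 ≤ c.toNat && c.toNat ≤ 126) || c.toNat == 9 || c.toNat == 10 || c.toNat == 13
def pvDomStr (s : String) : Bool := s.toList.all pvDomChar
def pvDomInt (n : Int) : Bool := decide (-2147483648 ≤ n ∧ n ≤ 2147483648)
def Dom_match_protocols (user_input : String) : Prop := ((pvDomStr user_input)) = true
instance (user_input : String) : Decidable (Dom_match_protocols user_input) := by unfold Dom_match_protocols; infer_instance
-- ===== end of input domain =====

-- B replaces A's early-return priority chain by two staged passes: collect the priorities of ALL matched keywords from one flat keyword table, then select the minimum-priority response (objective: alternative; same cost).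

-- ===== PORT A =====
def match_protocols (user_input : String) : Option String :=
  let text := PySem.Str.lower user_input
  if PySem.Str.isIn "fever" text || PySem.Str.isIn "high temperature" text || PySem.Str.isIn "temperature" text then some
    "It sounds like you may have a fever. Please stay hydrated, get adequate rest, and monitor your temperature regularly. If the fever lasts more than 2 days, goes above 102°F (39°C), or is accompanied by severe symptoms like breathing difficulty or confusion, please consult a doctor."
  else
  if PySem.Str.isIn "cold" text || PySem.Str.isIn "runny nose" text || PySem.Str.isIn "sneezing" text || PySem.Str.isIn "nasal congestion" text then some
    "For common cold symptoms, make sure to rest well, drink warm fluids, and stay hydrated. Steam inhalation and warm saltwater gargles may help. Most colds resolve on their own within a few days. If symptoms worsen or persist beyond a week, consider consulting a doctor."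
  else
  if PySem.Str.isIn "cough" text then some
    "A mild cough can often be managed with warm fluids, honey (if suitable), and adequate rest. Avoid cold drinks and smoking. If the cough lasts more than 2 weeks, produces blood, or is associated with chest pain or shortness of breath, please seek medical advice."
  else
  if PySem.Str.isIn "sore throat" text || PySem.Str.isIn "throat pain" text || PySem.Str.isIn "throat infection" text then some
    "For a sore throat, try warm saltwater gargles, stay hydrated, and rest your voice. Warm fluids may provide relief. If you experience high fever, difficulty swallowing, or symptoms lasting more than a few days, consult a healthcare professional."
  else
  if PySem.Str.isIn "headache" text || PySem.Str.isIn "head pain" text then some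
    "Headaches are often caused by stress, dehydration, or lack of sleep. Try resting in a quiet, dark room and drink enough water. If headaches are severe, persistent, or accompanied by vision problems, vomiting, or fever, please consult a doctor."
  else
  if PySem.Str.isIn "stomach pain" text || PySem.Str.isIn "abdominal pain" text || PySem.Str.isIn "diarrhea" text || PySem.Str.isIn "loose motion" text then some
    "For stomach discomfort or diarrhea, drink plenty of fluids and consider oral rehydration solutions (ORS). Eat light foods and avoid spicy or oily meals. If symptoms persist, worsen, or you notice blood in stools, seek medical care."
  else
  if PySem.Str.isIn "vomiting" text || PySem.Str.isIn "nausea" text || PySem.Str.isIn "throwing up" text then some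
    "If you are experiencing nausea or vomiting, try taking small sips of water or ORS and rest. Avoid heavy meals until symptoms improve. If vomiting is persistent, severe, or accompanied by dehydration or abdominal pain, consult a doctor."
  else
  if PySem.Str.isIn "body ache" text || PySem.Str.isIn "fatigue" text || PySem.Str.isIn "tired" text || PySem.Str.isIn "weakness" text then some
    "Body aches and fatigue can occur due to viral infections, stress, or lack of rest. Ensure proper sleep, hydration, and light meals. If fatigue is severe, long-lasting, or affecting daily activities, it’s best to consult a healthcare provider."
  else
  none

-- ===== PORT B =====
def pvKeywords : List (String × Nat) := [
  ("fever", 0),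
  ("high temperature", 0),
  ("temperature", 0),
  ("cold", 1),
  ("runny nose", 1),
  ("sneezing", 1),
  ("nasal congestion", 1),
  ("cough", 2),
  ("sore throat", 3),
  ("throat pain", 3),
  ("throat infection", 3),
  ("headache", 4),
  ("head pain", 4),
  ("stomach pain", 5),
  ("abdominal pain", 5),
  ("diarrhea", 5),
  ("loose motion", 5),
  ("vomiting", 6),
  ("nausea", 6),
  ("throwing up", 6),
  ("body ache", 7),
  ("fatigue", 7),
  ("tired", 7),
  ("weakness", 7)]

def pvResponses : List String := [
  "It sounds like you may have a fever. Please stay hydrated, get adequate rest, and monitor your temperature regularly. If the fever lasts more than 2 days, goes above 102°F (39°C), or is accompanied by severe symptoms like breathing difficulty or confusion, please consult a doctor.",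
  "For common cold symptoms, make sure to rest well, drink warm fluids, and stay hydrated. Steam inhalation and warm saltwater gargles may help. Most colds resolve on their own within a few days. If symptoms worsen or persist beyond a week, consider consulting a doctor.",
  "A mild cough can often be managed with warm fluids, honey (if suitable), and adequate rest. Avoid cold drinks and smoking. If the cough lasts more than 2 weeks, produces blood, or is associated with chest pain or shortness of breath, please seek medical advice.",
  "For a sore throat, try warm saltwater gargles, stay hydrated, and rest your voice. Warm fluids may provide relief. If you experience high fever, difficulty swallowing, or symptoms lasting more than a few days, consult a healthcare professional.",
  "Headaches are often caused by stress, dehydration, or lack of sleep. Try resting in a quiet, dark room and drink enough water. If headaches are severe, persistent, or accompanied by vision problems, vomiting, or fever, please consult a doctor.",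
  "For stomach discomfort or diarrhea, drink plenty of fluids and consider oral rehydration solutions (ORS). Eat light foods and avoid spicy or oily meals. If symptoms persist, worsen, or you notice blood in stools, seek medical care.",
  "If you are experiencing nausea or vomiting, try taking small sips of water or ORS and rest. Avoid heavy meals until symptoms improve. If vomiting is persistent, severe, or accompanied by dehydration or abdominal pain, consult a doctor.",
  "Body aches and fatigue can occur due to viral infections, stress, or lack of rest. Ensure proper sleep, hydration, and light meals. If fatigue is severe, long-lasting, or affecting daily activities, it’s best to consult a healthcare provider."]

def match_protocols_alt (user_input : String) : Option String :=
  let text := PySem.Str.lower user_input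
  let matched := pvKeywords.filterMap (fun p => if PySem.Str.isIn p.1 text then some p.2 else none)
  match PySem.List.min? matched (fun x => x) with
  | none => none
  | some i => some (pvResponses.getD i "")

-- ===== PRECONDITION & SPEC =====
def Spec_match_protocols (user_input : String) (out : Option String) : Prop := out = match_protocols_alt user_input
instance (user_input : String) (out : Option String) : Decidable (Spec_match_protocols user_input out) := by unfold Spec_match_protocols; infer_instance

-- ===== CLAIM (what is proved, stated in full; the proofs are below) =====
def Claim_equal_match_protocols : Prop := ∀ (user_input : String), Dom_match_protocols user_input → Spec_match_protocols user_input (match_protocols user_input)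

-- ===== LEMMAS AND PROOFS =====

lemma pvSkip {t kw : String} {i : Nat} {ks : List (String × Nat)}
    (h : PySem.Str.isIn kw t = false) :
    ((kw, i) :: ks).filterMap (fun p => if PySem.Str.isIn p.1 t then some p.2 else none)
      = ks.filterMap (fun p => if PySem.Str.isIn p.1 t then some p.2 else none) := by
  simp only [PySem.Str.isIn_eq] at h
  simp [h]

lemma pvHit {t kw : String} {i : Nat} {ks : List (String × Nat)}
    (h : PySem.Str.isIn kw t = true) :
    ((kw, i) :: ks).filterMap (fun p => if PySem.Str.isIn p.1 t then some p.2 else none)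
      = i :: ks.filterMap (fun p => if PySem.Str.isIn p.1 t then some p.2 else none) := by
  simp only [PySem.Str.isIn_eq] at h
  simp [h]

lemma pvFoldlMin (l : List Nat) (a : Nat) (h : ∀ x ∈ l, a ≤ x) : l.foldl min a = a := by
  induction l with
  | nil => rfl
  | cons x xs ih =>
    have hx : a ≤ x := h x (List.mem_cons_self)
    simp only [List.foldl_cons, Nat.min_eq_left hx]
    exact ih (fun y hy => h y (List.mem_cons_of_mem _ hy))

lemma pvMinFilter (t : String) (i : Nat) (ks : List (String × Nat))
    (h : ∀ p ∈ ks, i ≤ p.2) :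
    PySem.List.min? (i :: ks.filterMap (fun p => if PySem.Str.isIn p.1 t then some p.2 else none)) (fun x => x) = some i := by
  rw [PySem.List.min?_id_cons]
  congr 1
  apply pvFoldlMin
  intro x hx
  rcases List.mem_filterMap.mp hx with ⟨p, hp, hfx⟩
  simp only [Option.ite_none_right_eq_some, Option.some.injEq] at hfx
  exact hfx.2 ▸ h p hp

-- ===== VERDICT (by name: the statement is the Claim_ definition above) =====
theorem match_protocols_spec : Claim_equal_match_protocols := by
  intro s _
  unfold Spec_match_protocols match_protocols match_protocols_alt
  simp only [pvKeywords]
  set t := PySem.Str.lower s with ht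
  cases h0 : PySem.Str.isIn "fever" t with
  | true =>
    rw [pvHit h0, pvMinFilter t 0 _ (by decide)]
    simp only [Bool.true_or]
    rfl
  | false =>
  rw [pvSkip h0]
  cases h1 : PySem.Str.isIn "high temperature" t with
  | true =>
    rw [pvHit h1, pvMinFilter t 0 _ (by decide)]
    simp only [Bool.true_or, Bool.or_true]
    rfl
  | false =>
  rw [pvSkip h1]
  cases h2 : PySem.Str.isIn "temperature" t with
  | true =>
    rw [pvHit h2, pvMinFilter t 0 _ (by decide)]
    simp only [Bool.or_false, Bool.or_true]
    rfl
  | false =>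
  rw [pvSkip h2]
  cases h3 : PySem.Str.isIn "cold" t with
  | true =>
    rw [pvHit h3, pvMinFilter t 1 _ (by decide)]
    simp only [Bool.or_false, Bool.true_or]
    rfl
  | false =>
  rw [pvSkip h3]
  cases h4 : PySem.Str.isIn "runny nose" t with
  | true =>
    rw [pvHit h4, pvMinFilter t 1 _ (by decide)]
    simp only [Bool.or_false, Bool.true_or, Bool.or_true]
    rfl
  | false =>
  rw [pvSkip h4]
  cases h5 : PySem.Str.isIn "sneezing" t with
  | true =>
    rw [pvHit h5, pvMinFilter t 1 _ (by decide)]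
    simp only [Bool.or_false, Bool.true_or, Bool.or_true]
    rfl
  | false =>
  rw [pvSkip h5]
  cases h6 : PySem.Str.isIn "nasal congestion" t with
  | true =>
    rw [pvHit h6, pvMinFilter t 1 _ (by decide)]
    simp only [Bool.or_false, Bool.or_true]
    rfl
  | false =>
  rw [pvSkip h6]
  cases h7 : PySem.Str.isIn "cough" t with
  | true =>
    rw [pvHit h7, pvMinFilter t 2 _ (by decide)]
    simp only [Bool.or_false]
    rfl
  | false =>
  rw [pvSkip h7]
  cases h8 : PySem.Str.isIn "sore throat" t with
  | true =>
    rw [pvHit h8, pvMinFilter t 3 _ (by decide)]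
    simp only [Bool.or_false, Bool.true_or]
    rfl
  | false =>
  rw [pvSkip h8]
  cases h9 : PySem.Str.isIn "throat pain" t with
  | true =>
    rw [pvHit h9, pvMinFilter t 3 _ (by decide)]
    simp only [Bool.or_false, Bool.true_or, Bool.or_true]
    rfl
  | false =>
  rw [pvSkip h9]
  cases h10 : PySem.Str.isIn "throat infection" t with
  | true =>
    rw [pvHit h10, pvMinFilter t 3 _ (by decide)]
    simp only [Bool.or_false, Bool.or_true]
    rfl
  | false =>
  rw [pvSkip h10]
  cases h11 : PySem.Str.isIn "headache" t with
  | true =>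
    rw [pvHit h11, pvMinFilter t 4 _ (by decide)]
    simp only [Bool.or_false, Bool.true_or]
    rfl
  | false =>
  rw [pvSkip h11]
  cases h12 : PySem.Str.isIn "head pain" t with
  | true =>
    rw [pvHit h12, pvMinFilter t 4 _ (by decide)]
    simp only [Bool.or_false, Bool.or_true]
    rfl
  | false =>
  rw [pvSkip h12]
  cases h13 : PySem.Str.isIn "stomach pain" t with
  | true =>
    rw [pvHit h13, pvMinFilter t 5 _ (by decide)]
    simp only [Bool.or_false, Bool.true_or]
    rfl
  | false =>
  rw [pvSkip h13]
  cases h14 : PySem.Str.isIn "abdominal pain" t with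
  | true =>
    rw [pvHit h14, pvMinFilter t 5 _ (by decide)]
    simp only [Bool.or_false, Bool.true_or, Bool.or_true]
    rfl
  | false =>
  rw [pvSkip h14]
  cases h15 : PySem.Str.isIn "diarrhea" t with
  | true =>
    rw [pvHit h15, pvMinFilter t 5 _ (by decide)]
    simp only [Bool.or_false, Bool.true_or, Bool.or_true]
    rfl
  | false =>
  rw [pvSkip h15]
  cases h16 : PySem.Str.isIn "loose motion" t with
  | true =>
    rw [pvHit h16, pvMinFilter t 5 _ (by decide)]
    simp only [Bool.or_false, Bool.or_true]
    rfl
  | false =>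
  rw [pvSkip h16]
  cases h17 : PySem.Str.isIn "vomiting" t with
  | true =>
    rw [pvHit h17, pvMinFilter t 6 _ (by decide)]
    simp only [Bool.or_false, Bool.true_or]
    rfl
  | false =>
  rw [pvSkip h17]
  cases h18 : PySem.Str.isIn "nausea" t with
  | true =>
    rw [pvHit h18, pvMinFilter t 6 _ (by decide)]
    simp only [Bool.or_false, Bool.true_or, Bool.or_true]
    rfl
  | false =>
  rw [pvSkip h18]
  cases h19 : PySem.Str.isIn "throwing up" t with
  | true =>
    rw [pvHit h19, pvMinFilter t 6 _ (by decide)]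
    simp only [Bool.or_false, Bool.or_true]
    rfl
  | false =>
  rw [pvSkip h19]
  cases h20 : PySem.Str.isIn "body ache" t with
  | true =>
    rw [pvHit h20, pvMinFilter t 7 _ (by decide)]
    simp only [Bool.or_false, Bool.true_or]
    rfl
  | false =>
  rw [pvSkip h20]
  cases h21 : PySem.Str.isIn "fatigue" t with
  | true =>
    rw [pvHit h21, pvMinFilter t 7 _ (by decide)]
    simp only [Bool.or_false, Bool.true_or, Bool.or_true]
    rfl
  | false =>
  rw [pvSkip h21]
  cases h22 : PySem.Str.isIn "tired" t with
  | true =>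
    rw [pvHit h22, pvMinFilter t 7 _ (by decide)]
    simp only [Bool.or_false, Bool.true_or, Bool.or_true]
    rfl
  | false =>
  rw [pvSkip h22]
  cases h23 : PySem.Str.isIn "weakness" t with
  | true =>
    rw [pvHit h23, pvMinFilter t 7 _ (by decide)]
    simp only [Bool.or_false, Bool.or_true]
    rfl
  | false =>
  rw [pvSkip h23]
  simp only [Bool.or_false]
  rfl
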